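-- pv_equiv track=rewrite | github.com/hkpatch/minipy | src/python/init.py | split_path
-- ===== SOURCE A (Python) =====
-- def split_path(path):
--     cached_pathes = []
--     name = ''
--     for c in path:
--         if c == '/' or c == '\\':
--             cached_pathes.append(name)
--             name = ''
--         else:
--             name += c
--     if name != '':cached_pathes.append(name)
--     return cached_pathes
-- ===== SOURCE B (Python) =====
-- def split_path(path):
--     for i, c in enumerate(path):
--         if c == '/' or c == '\\':
--             return [path[:i]] + split_path(path[i + 1:])
--     return [path] if path else []
-- ===== Notes on version B (the rewrite author's own statement) =====
-- stated objective: alternative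
-- what changed: Replaces A's single-pass character scan with a mutable name buffer by a recursive decomposition that finds the first separator and recurses on the remainder of the path.
import Mathlib
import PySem

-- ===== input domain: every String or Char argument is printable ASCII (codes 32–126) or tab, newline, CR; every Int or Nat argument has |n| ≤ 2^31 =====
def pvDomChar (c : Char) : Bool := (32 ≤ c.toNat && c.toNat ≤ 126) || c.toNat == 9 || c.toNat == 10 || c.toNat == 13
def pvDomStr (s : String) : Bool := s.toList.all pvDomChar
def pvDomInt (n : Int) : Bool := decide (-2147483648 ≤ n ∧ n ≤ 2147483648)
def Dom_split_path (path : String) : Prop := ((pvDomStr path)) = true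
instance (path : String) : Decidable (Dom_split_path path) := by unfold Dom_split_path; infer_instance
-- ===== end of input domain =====

-- B visits the first separator and recurses on the rest of the path instead of A's
-- accumulator scan; same values, alternative structure.

-- ===== PORT A =====
-- A: single left-to-right scan; 'name' is the character buffer, flushed at each separator;
-- the final nonempty buffer is appended at the end.
def split_path (path : String) : List String :=
  let st := path.toList.foldl
    (fun (st : List String × List Char) c =>
      if c = '/' ∨ c = '\\' then (st.1 ++ [String.mk st.2], []) else (st.1, st.2 ++ [c]))
    ([], [])
  if st.2 ≠ [] then st.1 ++ [String.mk st.2] else st.1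

-- ===== PORT B =====
-- B: index of the first '/' or '\' (the enumerate loop of Source B), none if absent.
def pvFindSep : List Char → Option Nat
  | [] => none
  | c :: cs => if c = '/' ∨ c = '\\' then some 0 else (pvFindSep cs).map (· + 1)

theorem pvFindSep_lt : ∀ (cs : List Char) (i : Nat), pvFindSep cs = some i → i < cs.length := by
  intro cs
  induction cs with
  | nil => intro i h; simp [pvFindSep] at h
  | cons c cs ih =>
    intro i h
    simp only [pvFindSep] at h
    split at h
    · simp at h ⊢; omega
    · simp [Option.map_eq_some_iff] at h
      obtain ⟨j, hj, rfl⟩ := h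
      have := ih j hj
      simp; omega

-- B: emit the slice before the first separator and recurse on the remainder.
def pvSplitGo (cs : List Char) : List String :=
  match h : pvFindSep cs with
  | some i => String.mk (cs.take i) :: pvSplitGo (cs.drop (i + 1))
  | none => if cs.isEmpty then [] else [String.mk cs]
termination_by cs.length
decreasing_by
  have := pvFindSep_lt cs i h
  simp only [List.length_drop]
  omega

def split_path_alt (path : String) : List String := pvSplitGo path.toList

-- ===== PRECONDITION & SPEC =====
def Spec_split_path (path : String) (out : List String) : Prop := out = split_path_alt path
instance (path : String) (out : List String) : Decidable (Spec_split_path path out) := by unfold Spec_split_path; infer_instance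

-- ===== CLAIM (what is proved, stated in full; the proofs are below) =====
def Claim_equal_split_path : Prop := ∀ (path : String), Dom_split_path path → Spec_split_path path (split_path path)

-- ===== LEMMAS AND PROOFS =====

-- intermediate characterisation: split the suffix cs given the pending buffer 'name'
def pvG (name : List Char) : List Char → List String
  | [] => if name = [] then [] else [String.mk name]
  | c :: cs => if c = '/' ∨ c = '\\' then String.mk name :: pvG [] cs else pvG (name ++ [c]) cs

def pvSepFree (l : List Char) : Prop := ∀ c ∈ l, ¬ (c = '/' ∨ c = '\\')

theorem pvFindSep_none (l : List Char) (h : pvSepFree l) : pvFindSep l = none := by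
  induction l with
  | nil => rfl
  | cons c cs ih =>
    have hc := h c (by simp)
    simp only [pvFindSep, if_neg hc]
    rw [ih (fun x hx => h x (by simp [hx]))]
    rfl

theorem pvFindSep_append (name : List Char) (h : pvSepFree name) (c : Char)
    (hc : c = '/' ∨ c = '\\') (cs : List Char) :
    pvFindSep (name ++ c :: cs) = some name.length := by
  induction name with
  | nil => simp [pvFindSep, if_pos hc]
  | cons a name ih =>
    have ha := h a (by simp)
    simp only [List.cons_append, pvFindSep, if_neg ha,
      ih (fun x hx => h x (by simp [hx]))]
    simp

theorem pvSplitGo_eq_pvG : ∀ (cs name : List Char), pvSepFree name →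
    pvSplitGo (name ++ cs) = pvG name cs := by
  intro cs
  induction cs with
  | nil =>
    intro name h
    rw [pvSplitGo, List.append_nil]
    split
    · rename_i i heq
      rw [pvFindSep_none name h] at heq
      exact absurd heq (by simp)
    · simp only [pvG]
      by_cases hn : name = [] <;> simp [hn]
  | cons c cs ih =>
    intro name h
    by_cases hc : c = '/' ∨ c = '\\'
    · rw [pvSplitGo]
      split
      · rename_i i heq
        rw [pvFindSep_append name h c hc cs] at heq
        have hi : i = name.length := by simpa using heq.symm
        subst hi
        have ht : (name ++ c :: cs).take name.length = name := by
          simp [List.take_append]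
        have hd : (name ++ c :: cs).drop (name.length + 1) = cs := by
          rw [← List.drop_drop, List.drop_append_of_le_length (le_refl _)]
          simp
        rw [ht, hd]
        simp only [pvG, if_pos hc]
        congr 1
        have := ih [] (by intro x hx; simp at hx)
        simpa using this
      · rename_i heq
        rw [pvFindSep_append name h c hc cs] at heq
        exact absurd heq (by simp)
    · have h' : pvSepFree (name ++ [c]) := by
        intro x hx
        rcases List.mem_append.mp hx with hx | hx
        · exact h x hx
        · simp at hx; subst hx; exact hc
      have := ih (name ++ [c]) h'
      simp only [pvG, if_neg hc]
      rw [← this]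
      simp

theorem pvFoldA_eq_pvG : ∀ (cs : List Char) (acc : List String) (name : List Char),
    (let st := cs.foldl
      (fun (st : List String × List Char) c =>
        if c = '/' ∨ c = '\\' then (st.1 ++ [String.mk st.2], []) else (st.1, st.2 ++ [c]))
      (acc, name)
     if st.2 ≠ [] then st.1 ++ [String.mk st.2] else st.1) = acc ++ pvG name cs := by
  intro cs
  induction cs with
  | nil =>
    intro acc name
    simp only [List.foldl_nil, pvG]
    by_cases hn : name = [] <;> simp [hn]
  | cons c cs ih =>
    intro acc name
    by_cases hc : c = '/' ∨ c = '\\'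
    · simp only [List.foldl_cons, if_pos hc, pvG]
      rw [ih]
      simp
    · simp only [List.foldl_cons, if_neg hc, pvG]
      rw [ih]

-- ===== VERDICT (by name: the statement is the Claim_ definition above) =====
theorem split_path_spec : Claim_equal_split_path := by
  intro path _
  unfold Spec_split_path split_path split_path_alt
  have hA := pvFoldA_eq_pvG path.toList [] []
  simp only at hA
  rw [hA]
  have hB := pvSplitGo_eq_pvG path.toList [] (by intro x hx; simp at hx)
  simpa using hB.symm
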